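-- pv_equiv track=rewrite | github.com/releng-tool/releng-tool | releng/util/io.py | interpretStemExtension
-- ===== SOURCE A (Python) =====
-- MULTIPART_EXTENSIONS = [
--     'tar.bz',
--     'tar.bz2',
--     'tar.gz',
--     'tar.lzma',
--     'tar.xz',
--     'tar.z',
-- ]
--
-- def interpretStemExtension(basename):
--     """
--     interpret the stem and extension from a provided basename
--
--     Attempts to return the stem value and the an assumed "complete" extension
--     value from a provided ``basename``. While a file extension is more
--     "commonly" the last dot part of a path's base name, this does not apply to
--     resources where they may have multiple extension parts (e.g. my-file.tar.gz)
--     or have no extension (my-file).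
--
--     Examples for some basenames are as follows:
--
--      - my-file.txt -> (my-file, txt)
--      - my-file.tar.gz -> (my-file, tar.gz)
--      - my.file.name.dat -> (my.file.name, dat)
--      - my-file -> (my-file, None)
--      - None -> (None, None)
--
--     Args:
--         basename: the basename to interpret
--
--     Returns:
--         a 2-tuple (stem, extension)
--     """
--     if not basename:
--         return (None, None)
--
--     if '.' not in basename:
--         return (basename, None)
--
--     stem, ext = basename.split('.', 1)
--     while '.' in ext:
--         if ext.lower() in MULTIPART_EXTENSIONS:
--             break
--
--         part, ext = ext.split('.', 1)
--         stem = '{}.{}'.format(stem, part)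
--
--     return (stem, ext)
-- ===== SOURCE B (Python) =====
-- MULTIPART_EXTENSIONS = [
--     'tar.bz',
--     'tar.bz2',
--     'tar.gz',
--     'tar.lzma',
--     'tar.xz',
--     'tar.z',
-- ]
--
-- def interpretStemExtension(basename):
--     # scan from the RIGHT: locate the last dot, and the dot before it; if the
--     # suffix after the second-to-last dot is a known multipart extension use
--     # it, otherwise split at the last dot.  (Every multipart entry has exactly
--     # two parts, so only the suffix after the second-to-last dot can match.)
--     if not basename:
--         return (None, None)
--     i = basename.rfind('.')
--     if i < 0:
--         return (basename, None)
--     j = basename.rfind('.', 0, i)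
--     if j >= 0 and basename[j + 1:].lower() in MULTIPART_EXTENSIONS:
--         return (basename[:j], basename[j + 1:])
--     return (basename[:i], basename[i + 1:])
-- ===== Notes on version B (the rewrite author's own statement) =====
-- stated objective: simpler
-- what changed: A's left-to-right peeling while-loop that repeatedly re-splits and re-tests the shrinking extension is replaced by a right-to-left scan: find the last dot and the dot before it with rfind and decide between the one-part and the known two-part extension by a single lowercased membership test.
import Mathlib
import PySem

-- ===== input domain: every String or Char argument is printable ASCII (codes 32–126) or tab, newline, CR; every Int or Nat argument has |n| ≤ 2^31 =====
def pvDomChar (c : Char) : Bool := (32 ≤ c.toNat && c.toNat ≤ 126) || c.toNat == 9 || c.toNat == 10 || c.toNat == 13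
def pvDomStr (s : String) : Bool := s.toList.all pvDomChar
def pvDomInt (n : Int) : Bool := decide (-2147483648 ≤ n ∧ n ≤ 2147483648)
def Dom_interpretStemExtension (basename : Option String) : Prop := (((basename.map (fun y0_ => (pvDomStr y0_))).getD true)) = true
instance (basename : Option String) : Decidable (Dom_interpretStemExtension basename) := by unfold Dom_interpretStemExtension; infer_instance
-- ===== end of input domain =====

-- B replaces A's left-to-right peeling while-loop by a right-to-left scan for the
-- last two dots (objective: simpler).

-- MULTIPART_EXTENSIONS, as lists of code points
def multipartExtensions : List (List Char) :=
  ["tar.bz", "tar.bz2", "tar.gz", "tar.lzma", "tar.xz", "tar.z"].map String.toList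

-- ===== PORT A =====
-- A's `stem, ext = s.split('.', 1)` with '.' known to occur in s: the piece before the
-- first '.' and the piece after it.  takeWhile/dropWhile-tail is exact for a one-character
-- separator that is present in the string.
def loopA (stem ext : List Char) : List Char × List Char :=
  -- `'.' in ext` for a single character is exactly character membership
  if h : '.' ∈ ext then
    if PySem.Chars.lower ext ∈ multipartExtensions then (stem, ext)
    else
      -- part, ext = ext.split('.', 1); stem = '{}.{}'.format(stem, part)
      loopA (stem ++ '.' :: ext.takeWhile (· ≠ '.')) ((ext.dropWhile (· ≠ '.')).tail)
  else (stem, ext)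
termination_by ext.length
decreasing_by
  have hd : ext.dropWhile (· ≠ '.') ≠ [] := by
    intro hnil
    have := (List.dropWhile_eq_nil_iff (l := ext) (p := (· ≠ '.'))).mp hnil '.' h
    simp at this
  have h1 : (ext.dropWhile (· ≠ '.')).length ≤ ext.length := List.length_dropWhile_le _ _
  have h2 : ((ext.dropWhile (· ≠ '.')).tail).length < (ext.dropWhile (· ≠ '.')).length := by
    cases hdw : ext.dropWhile (· ≠ '.') with
    | nil => exact absurd hdw hd
    | cons a t => simp
  omega

def interpretStemExtension (basename : Option String) : Option String × Option String :=
  match basename with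
  | none => (none, none)                                -- `if not basename`
  | some s =>
    if s.toList = [] then (none, none)                  -- `if not basename` (empty string)
    else if '.' ∈ s.toList then
      let stem := s.toList.takeWhile (· ≠ '.')          -- stem, ext = basename.split('.', 1)
      let ext := (s.toList.dropWhile (· ≠ '.')).tail
      let r := loopA stem ext
      (some (String.ofList r.1), some (String.ofList r.2))
    else (some s, none)                                 -- `if '.' not in basename`

-- ===== PORT B =====
-- basename.rfind('.') based split at the LAST dot: `rsplitDot cs = (cs[:i], cs[i+1:])`
-- where i is the index of the last '.' (exact when '.' ∈ cs).  Implemented on the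
-- reversed list: the chars after the last dot are the reversed longest dot-free suffix.
def rsplitDot (cs : List Char) : List Char × List Char :=
  (((cs.reverse.dropWhile (· ≠ '.')).tail).reverse,     -- cs[:i]
   (cs.reverse.takeWhile (· ≠ '.')).reverse)            -- cs[i+1:]

def interpretStemExtension_alt (basename : Option String) : Option String × Option String :=
  match basename with
  | none => (none, none)                                -- `if not basename`
  | some s =>
    if s.toList = [] then (none, none)
    else if '.' ∈ s.toList then                          -- `i = rfind('.'); if i < 0 …`
      let p := rsplitDot s.toList                        -- (basename[:i], basename[i+1:])
      -- `j = basename.rfind('.', 0, i)`: j ≥ 0 iff '.' ∈ p.1; basename[j+1:] is then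
      -- the part of p.1 after ITS last dot, a dot, and p.2
      if '.' ∈ p.1 ∧
          PySem.Chars.lower ((rsplitDot p.1).2 ++ '.' :: p.2) ∈ multipartExtensions then
        (some (String.ofList (rsplitDot p.1).1),
         some (String.ofList ((rsplitDot p.1).2 ++ '.' :: p.2)))
      else
        (some (String.ofList p.1), some (String.ofList p.2))
    else (some s, none)

-- ===== PRECONDITION & SPEC =====
def Spec_interpretStemExtension (basename : Option String) (out : Option String × Option String) : Prop := out = interpretStemExtension_alt basename
instance (basename : Option String) (out : Option String × Option String) : Decidable (Spec_interpretStemExtension basename out) := by unfold Spec_interpretStemExtension; infer_instance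

-- ===== CLAIM (what is proved, stated in full; the proofs are below) =====
def Claim_equal_interpretStemExtension : Prop := ∀ (basename : Option String), Dom_interpretStemExtension basename → Spec_interpretStemExtension basename (interpretStemExtension basename)

-- ===== LEMMAS AND PROOFS =====

-- J abbreviates the '.'-join; splitDot is a PROOF-ONLY full split on '.', used to
-- characterise both ports by the list of dot-free parts of the basename.
def J (ps : List (List Char)) : List Char := PySem.Chars.join ['.'] ps

def splitDot (cs : List Char) : List (List Char) :=
  if h : '.' ∈ cs then
    cs.takeWhile (· ≠ '.') :: splitDot ((cs.dropWhile (· ≠ '.')).tail)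
  else [cs]
termination_by cs.length
decreasing_by
  have hd : cs.dropWhile (· ≠ '.') ≠ [] := by
    intro hnil
    have := (List.dropWhile_eq_nil_iff (l := cs) (p := (· ≠ '.'))).mp hnil '.' h
    simp at this
  have h1 : (cs.dropWhile (· ≠ '.')).length ≤ cs.length := List.length_dropWhile_le _ _
  have h2 : ((cs.dropWhile (· ≠ '.')).tail).length < (cs.dropWhile (· ≠ '.')).length := by
    cases hdw : cs.dropWhile (· ≠ '.') with
    | nil => exact absurd hdw hd
    | cons a t => simp
  omega

lemma tw_append (p t : List Char) (hp : '.' ∉ p) :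
    (p ++ '.' :: t).takeWhile (· ≠ '.') = p := by
  induction p with
  | nil => simp
  | cons a as ih =>
    simp only [List.mem_cons, not_or] at hp
    have ha : ¬ a = '.' := fun h => hp.1 h.symm
    simp only [List.cons_append, List.takeWhile_cons]
    simpa [ha] using ih hp.2

lemma dw_append (p t : List Char) (hp : '.' ∉ p) :
    (p ++ '.' :: t).dropWhile (· ≠ '.') = '.' :: t := by
  induction p with
  | nil => simp
  | cons a as ih =>
    simp only [List.mem_cons, not_or] at hp
    have ha : ¬ a = '.' := fun h => hp.1 h.symm
    simp only [List.cons_append, List.dropWhile_cons]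
    simpa [ha] using ih hp.2

lemma tw_append_mem (l1 l2 : List Char) (h : '.' ∈ l1) :
    (l1 ++ l2).takeWhile (· ≠ '.') = l1.takeWhile (· ≠ '.') := by
  induction l1 with
  | nil => simp at h
  | cons a as ih =>
    by_cases ha : a = '.'
    · subst ha; simp
    · have h' : '.' ∈ as := by
        rcases List.mem_cons.mp h with h1 | h1
        · exact absurd h1.symm ha
        · exact h1
      simp only [List.cons_append, List.takeWhile_cons]
      simpa [ha] using ih h'

lemma dw_append_mem (l1 l2 : List Char) (h : '.' ∈ l1) :
    (l1 ++ l2).dropWhile (· ≠ '.') = l1.dropWhile (· ≠ '.') ++ l2 := by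
  induction l1 with
  | nil => simp at h
  | cons a as ih =>
    by_cases ha : a = '.'
    · subst ha; simp
    · have h' : '.' ∈ as := by
        rcases List.mem_cons.mp h with h1 | h1
        · exact absurd h1.symm ha
        · exact h1
      simp only [List.cons_append, List.dropWhile_cons]
      simpa [ha] using ih h'

lemma join_glue (a b : List Char) (xs : List (List Char)) :
    J ((a ++ '.' :: b) :: xs) = a ++ '.' :: J (b :: xs) := by
  cases xs with
  | nil => simp [J, PySem.Chars.join_singleton]
  | cons y ys =>
    simp [J, PySem.Chars.join_cons_cons]

lemma dropWhile_dot (cs : List Char) (h : '.' ∈ cs) :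
    cs.dropWhile (· ≠ '.') = '.' :: (cs.dropWhile (· ≠ '.')).tail := by
  induction cs with
  | nil => simp at h
  | cons a t ih =>
    by_cases ha : a = '.'
    · subst ha; simp
    · have ht : '.' ∈ t := by
        rcases List.mem_cons.mp h with h1 | h1
        · exact absurd h1.symm ha
        · exact h1
      simpa [ha] using ih ht

lemma splitDot_ne_nil (cs : List Char) : splitDot cs ≠ [] := by
  unfold splitDot
  split <;> simp

lemma join_splitDot (cs : List Char) : J (splitDot cs) = cs := by
  induction cs using splitDot.induct with
  | case1 cs h ih =>
    rw [splitDot, dif_pos h]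
    have hsplit : cs.takeWhile (· ≠ '.') ++ cs.dropWhile (· ≠ '.') = cs :=
      List.takeWhile_append_dropWhile
    have hdw : cs.dropWhile (· ≠ '.') = '.' :: (cs.dropWhile (· ≠ '.')).tail :=
      dropWhile_dot cs h
    cases hsd : splitDot ((cs.dropWhile (· ≠ '.')).tail) with
    | nil => exact absurd hsd (splitDot_ne_nil _)
    | cons z zs =>
      rw [hsd] at ih
      calc J (cs.takeWhile (· ≠ '.') :: z :: zs)
          = cs.takeWhile (· ≠ '.') ++ '.' :: J (z :: zs) := by
            simp [J, PySem.Chars.join_cons_cons]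
        _ = cs := by rw [ih, ← hdw, hsplit]
  | case2 cs h =>
    rw [splitDot, dif_neg h]
    simp [J, PySem.Chars.join_singleton]

lemma splitDot_parts (cs : List Char) : ∀ q ∈ splitDot cs, '.' ∉ q := by
  induction cs using splitDot.induct with
  | case1 cs h ih =>
    rw [splitDot, dif_pos h]
    intro q hq
    rcases List.mem_cons.mp hq with rfl | hq
    · intro hdot
      have := List.mem_takeWhile_imp hdot
      simp at this
    · exact ih q hq
  | case2 cs h =>
    rw [splitDot, dif_neg h]
    intro q hq
    simp only [List.mem_singleton] at hq
    subst hq; exact h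

lemma lowerChar_eq_dot (c : Char) : PySem.Chars.lowerChar c = '.' ↔ c = '.' := by
  unfold PySem.Chars.lowerChar PySem.Chars.isupper
  split
  · rename_i hcu
    simp only [Bool.and_eq_true, decide_eq_true_eq] at hcu
    constructor
    · intro hc
      exfalso
      have h1 : 65 ≤ c.toNat := hcu.1
      have h2 : c.toNat ≤ 90 := hcu.2
      have hv : (c.toNat + 32).isValidChar := Or.inl (by omega)
      have : (Char.ofNat (c.toNat + 32)).toNat = c.toNat + 32 := by
        rw [Char.toNat_ofNat, if_pos hv]
      have hdot : ('.' : Char).toNat = 46 := by decide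
      rw [hc, hdot] at this
      omega
    · intro hc
      subst hc
      exfalso
      have : ('.' : Char).toNat = 46 := by decide
      have h1 : 65 ≤ ('.' : Char).toNat := hcu.1
      omega
  · exact Iff.rfl

lemma count_lower (xs : List Char) :
    (PySem.Chars.lower xs).count '.' = xs.count '.' := by
  simp only [PySem.Chars.lower, List.count_eq_countP, List.countP_map]
  apply List.countP_congr
  intro c _
  simp [Function.comp, lowerChar_eq_dot]

lemma count_join (ps : List (List Char)) (hne : ps ≠ []) (h : ∀ q ∈ ps, '.' ∉ q) :
    (J ps).count '.' = ps.length - 1 := by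
  induction ps with
  | nil => exact absurd rfl hne
  | cons p qs ih =>
    cases qs with
    | nil =>
      simp [J, PySem.Chars.join_singleton, List.count_eq_zero.mpr (h p (by simp))]
    | cons q rs =>
      have hrw : J (p :: q :: rs) = p ++ '.' :: J (q :: rs) := by
        simp [J, PySem.Chars.join_cons_cons]
      rw [hrw, List.count_append, List.count_cons]
      rw [ih (by simp) (fun r hr => h r (List.mem_cons_of_mem _ hr))]
      rw [List.count_eq_zero.mpr (h p (by simp))]
      simp only [List.length_cons, beq_self_eq_true, if_true]
      omega

lemma dot_mem_join_iff (ps : List (List Char)) (hne : ps ≠ []) (h : ∀ q ∈ ps, '.' ∉ q) :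
    '.' ∈ J ps ↔ 2 ≤ ps.length := by
  have hc := count_join ps hne h
  constructor
  · intro hmem
    have := List.count_pos_iff.mpr hmem
    omega
  · intro hlen
    have : 0 < (J ps).count '.' := by omega
    exact List.count_pos_iff.mp this

lemma mp_count (m : List Char) (hm : m ∈ multipartExtensions) : m.count '.' = 1 := by
  fin_cases hm <;> decide

lemma not_mp_of_many (all : List (List Char)) (h3 : 3 ≤ all.length)
    (h : ∀ q ∈ all, '.' ∉ q) :
    PySem.Chars.lower (J all) ∉ multipartExtensions := by
  intro hmem
  have h1 := mp_count _ hmem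
  rw [count_lower, count_join all (by rintro rfl; simp at h3) h] at h1
  omega

-- characterisation of A's loop over the dot-free parts of the extension
lemma loopA_join (all : List (List Char)) (hne : all ≠ []) (hq : ∀ q ∈ all, '.' ∉ q) :
    ∀ stem : List Char,
    loopA stem (J all) =
      if 2 ≤ all.length ∧
          PySem.Chars.lower (J (all.drop (all.length - 2))) ∈ multipartExtensions
      then (J (stem :: all.take (all.length - 2)), J (all.drop (all.length - 2)))
      else (J (stem :: all.dropLast), all.getLastD []) := by
  induction all with
  | nil => exact absurd rfl hne
  | cons p qs ih =>
    intro stem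
    have hp : '.' ∉ p := hq p (by simp)
    cases qs with
    | nil =>
      rw [loopA]
      have hnd : '.' ∉ J [p] := by simpa [J, PySem.Chars.join_singleton] using hp
      rw [dif_neg hnd]
      simp [J, PySem.Chars.join_singleton]
    | cons q rs =>
      have hqs : ∀ r ∈ q :: rs, '.' ∉ r := fun r hr => hq r (List.mem_cons_of_mem _ hr)
      have hrw : J (p :: q :: rs) = p ++ '.' :: J (q :: rs) := by
        simp [J, PySem.Chars.join_cons_cons]
      have hmem : '.' ∈ J (p :: q :: rs) := by rw [hrw]; simp
      rw [loopA, dif_pos hmem]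
      by_cases hmp : PySem.Chars.lower (J (p :: q :: rs)) ∈ multipartExtensions
      · -- must be exactly two parts
        have hrs : rs = [] := by
          by_contra hrs
          exact not_mp_of_many (p :: q :: rs)
            (by cases rs with | nil => exact absurd rfl hrs | cons _ _ => simp)
            hq hmp
        subst hrs
        rw [if_pos hmp]
        have hcond : 2 ≤ ([p, q] : List (List Char)).length ∧
            PySem.Chars.lower (J (([p, q] : List (List Char)).drop (([p, q] : List (List Char)).length - 2))) ∈ multipartExtensions := by
          constructor
          · simp
          · simpa using hmp
        rw [if_pos hcond]
        simp [J, PySem.Chars.join_singleton]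
      · rw [if_neg hmp]
        have htw : (J (p :: q :: rs)).takeWhile (· ≠ '.') = p := by
          rw [hrw]; exact tw_append _ _ hp
        have hdw : ((J (p :: q :: rs)).dropWhile (· ≠ '.')).tail = J (q :: rs) := by
          rw [hrw, dw_append _ _ hp]
          rfl
        rw [htw, hdw]
        rw [ih (by simp) hqs (stem ++ '.' :: p)]
        have hglue : ∀ xs, J ((stem ++ '.' :: p) :: xs) = J (stem :: p :: xs) := by
          intro xs
          rw [join_glue]
          cases xs with
          | nil => simp [J, PySem.Chars.join_singleton, PySem.Chars.join_cons_cons]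
          | cons y ys => simp [J, PySem.Chars.join_cons_cons]
        cases rs with
        | nil =>
          have hc1 : ¬ (2 ≤ ([q] : List (List Char)).length ∧
              PySem.Chars.lower (J (([q] : List (List Char)).drop (([q] : List (List Char)).length - 2))) ∈ multipartExtensions) := by
            simp
          have hc2 : ¬ (2 ≤ ([p, q] : List (List Char)).length ∧
              PySem.Chars.lower (J (([p, q] : List (List Char)).drop (([p, q] : List (List Char)).length - 2))) ∈ multipartExtensions) := by
            rintro ⟨-, hmm⟩
            exact hmp (by simpa using hmm)
          rw [if_neg hc1, if_neg hc2]
          simp [hglue]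
        | cons r rs' =>
          have hlen : (q :: r :: rs').length - 2 + 1 = (p :: q :: r :: rs').length - 2 := by
            simp
          have hdropEq : (q :: r :: rs').drop ((q :: r :: rs').length - 2)
              = (p :: q :: r :: rs').drop ((p :: q :: r :: rs').length - 2) := by
            rw [← hlen, List.drop_succ_cons]
          have htakeEq : p :: (q :: r :: rs').take ((q :: r :: rs').length - 2)
              = (p :: q :: r :: rs').take ((p :: q :: r :: rs').length - 2) := by
            rw [← hlen, List.take_succ_cons]
          have hcond : (2 ≤ (q :: r :: rs').length ∧
              PySem.Chars.lower (J ((q :: r :: rs').drop ((q :: r :: rs').length - 2))) ∈ multipartExtensions)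
              ↔ (2 ≤ (p :: q :: r :: rs').length ∧
              PySem.Chars.lower (J ((p :: q :: r :: rs').drop ((p :: q :: r :: rs').length - 2))) ∈ multipartExtensions) := by
            rw [hdropEq]
            constructor
            · rintro ⟨-, hmm⟩; exact ⟨by simp, hmm⟩
            · rintro ⟨-, hmm⟩; exact ⟨by simp, hmm⟩
          by_cases hc : 2 ≤ (q :: r :: rs').length ∧
              PySem.Chars.lower (J ((q :: r :: rs').drop ((q :: r :: rs').length - 2))) ∈ multipartExtensions
          · rw [if_pos hc, if_pos (hcond.mp hc), hglue, htakeEq, hdropEq]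
          · rw [if_neg hc, if_neg (fun hh => hc (hcond.mpr hh)), hglue]
            simp

-- the A-side reshaping: prefixing the stem as parts[0]
lemma b_shape (stem : List Char) (all : List (List Char)) (hne : all ≠ []) :
    (if 2 ≤ all.length ∧
        PySem.Chars.lower (J (all.drop (all.length - 2))) ∈ multipartExtensions
     then (J (stem :: all.take (all.length - 2)), J (all.drop (all.length - 2)))
     else (J (stem :: all.dropLast), all.getLastD []))
    =
    (if 3 ≤ (stem :: all).length ∧
        PySem.Chars.lower (J ((stem :: all).drop ((stem :: all).length - 2))) ∈ multipartExtensions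
     then (J ((stem :: all).take ((stem :: all).length - 2)),
           J ((stem :: all).drop ((stem :: all).length - 2)))
     else (J (stem :: all).dropLast, (stem :: all).getLastD [])) := by
  cases all with
  | nil => exact absurd rfl hne
  | cons a as =>
    cases as with
    | nil =>
      have h1 : ¬ (2 ≤ ([a] : List (List Char)).length ∧
          PySem.Chars.lower (J (([a] : List (List Char)).drop (([a] : List (List Char)).length - 2))) ∈ multipartExtensions) := by simp
      have h2 : ¬ (3 ≤ ([stem, a] : List (List Char)).length ∧
          PySem.Chars.lower (J (([stem, a] : List (List Char)).drop (([stem, a] : List (List Char)).length - 2))) ∈ multipartExtensions) := by simp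
      rw [if_neg h1, if_neg h2]
      simp [J, PySem.Chars.join_singleton]
    | cons b bs =>
      have hlen : (a :: b :: bs).length - 2 + 1 = (stem :: a :: b :: bs).length - 2 := by simp
      have hdropEq : (a :: b :: bs).drop ((a :: b :: bs).length - 2)
          = (stem :: a :: b :: bs).drop ((stem :: a :: b :: bs).length - 2) := by
        rw [← hlen, List.drop_succ_cons]
      have htakeEq : stem :: (a :: b :: bs).take ((a :: b :: bs).length - 2)
          = (stem :: a :: b :: bs).take ((stem :: a :: b :: bs).length - 2) := by
        rw [← hlen, List.take_succ_cons]
      have hcond : (2 ≤ (a :: b :: bs).length ∧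
          PySem.Chars.lower (J ((a :: b :: bs).drop ((a :: b :: bs).length - 2))) ∈ multipartExtensions)
          ↔ (3 ≤ (stem :: a :: b :: bs).length ∧
          PySem.Chars.lower (J ((stem :: a :: b :: bs).drop ((stem :: a :: b :: bs).length - 2))) ∈ multipartExtensions) := by
        rw [hdropEq]
        constructor
        · rintro ⟨-, hmm⟩; exact ⟨by simp, hmm⟩
        · rintro ⟨-, hmm⟩; exact ⟨by simp, hmm⟩
      by_cases hc : 2 ≤ (a :: b :: bs).length ∧
          PySem.Chars.lower (J ((a :: b :: bs).drop ((a :: b :: bs).length - 2))) ∈ multipartExtensions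
      · rw [if_pos hc, if_pos (hcond.mp hc), htakeEq, hdropEq]
      · rw [if_neg hc, if_neg (fun hh => hc (hcond.mpr hh))]
        simp

-- ===== rsplitDot characterisation (B side) =====

-- splitting at the last dot when the tail after the last dot is dot-free
lemma rsplit_last (p t : List Char) (ht : '.' ∉ t) :
    rsplitDot (p ++ '.' :: t) = (p, t) := by
  have htr : '.' ∉ t.reverse := by simpa using ht
  unfold rsplitDot
  have hrev : (p ++ '.' :: t).reverse = t.reverse ++ '.' :: p.reverse := by
    simp
  rw [hrev, tw_append _ _ htr, dw_append _ _ htr]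
  simp

lemma rsplit_cons (p t : List Char) (ht : '.' ∈ t) :
    rsplitDot (p ++ '.' :: t) = (p ++ '.' :: (rsplitDot t).1, (rsplitDot t).2) := by
  have htr : '.' ∈ t.reverse := by simpa using ht
  unfold rsplitDot
  have hrev : (p ++ '.' :: t).reverse = t.reverse ++ '.' :: p.reverse := by
    simp
  rw [hrev, tw_append_mem _ _ htr, dw_append_mem _ _ htr]
  have hdw : t.reverse.dropWhile (· ≠ '.') = '.' :: (t.reverse.dropWhile (· ≠ '.')).tail :=
    dropWhile_dot _ htr
  rw [hdw]
  simp

-- rsplitDot computed from the list of dot-free parts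
lemma rsplit_join (ps : List (List Char)) (h2 : 2 ≤ ps.length)
    (hq : ∀ q ∈ ps, '.' ∉ q) :
    rsplitDot (J ps) = (J ps.dropLast, ps.getLastD []) := by
  induction ps with
  | nil => simp at h2
  | cons p qs ih =>
    cases qs with
    | nil => simp at h2
    | cons q rs =>
      have hJ : J (p :: q :: rs) = p ++ '.' :: J (q :: rs) := by
        simp [J, PySem.Chars.join_cons_cons]
      cases rs with
      | nil =>
        have hqd : '.' ∉ J [q] := by
          simpa [J, PySem.Chars.join_singleton] using hq q (by simp)
        rw [hJ]
        rw [rsplit_last _ _ (by simpa [J, PySem.Chars.join_singleton] using hqd)]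
        simp [J, PySem.Chars.join_singleton]
      | cons r rs' =>
        have hqs : ∀ x ∈ q :: r :: rs', '.' ∉ x := fun x hx => hq x (List.mem_cons_of_mem _ hx)
        have hmem : '.' ∈ J (q :: r :: rs') :=
          (dot_mem_join_iff _ (by simp) hqs).mpr (by simp)
        rw [hJ, rsplit_cons _ _ hmem, ih (by simp) hqs]
        have h1 : p ++ '.' :: J ((q :: r :: rs').dropLast) = J ((p :: q :: r :: rs').dropLast) := by
          have hdl : (q :: r :: rs').dropLast = q :: (r :: rs').dropLast := by simp
          have hdl2 : (p :: q :: r :: rs').dropLast = p :: q :: (r :: rs').dropLast := by simp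
          rw [hdl, hdl2]
          cases hdd : (r :: rs').dropLast with
          | nil => simp [J, PySem.Chars.join_singleton, PySem.Chars.join_cons_cons]
          | cons z zs => simp [J, PySem.Chars.join_cons_cons]
        have h2 : (q :: r :: rs').getLastD [] = (p :: q :: r :: rs').getLastD [] := by simp
        rw [Prod.mk.injEq]
        exact ⟨h1, h2⟩

lemma two_tail (ps : List (List Char)) (h : 2 ≤ ps.length) :
    ∃ ks x y, ps = ks ++ [x, y] := by
  induction ps with
  | nil => simp at h
  | cons p qs ih =>
    cases qs with
    | nil => simp at h
    | cons q rs =>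
      cases rs with
      | nil => exact ⟨[], p, q, rfl⟩
      | cons r rs' =>
        obtain ⟨ks, x, y, hk⟩ := ih (by simp)
        exact ⟨p :: ks, x, y, by rw [hk]; rfl⟩

-- ===== VERDICT (by name: the statement is the Claim_ definition above) =====
theorem interpretStemExtension_spec : Claim_equal_interpretStemExtension := by
  intro basename _
  unfold Spec_interpretStemExtension
  cases basename with
  | none => rfl
  | some s =>
    by_cases hnil : s.toList = []
    · simp [interpretStemExtension, interpretStemExtension_alt, hnil]
    · simp only [interpretStemExtension, interpretStemExtension_alt]
      rw [if_neg hnil, if_neg hnil]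
      by_cases hdot : '.' ∈ s.toList
      · rw [if_pos hdot, if_pos hdot]
        -- the dot-free parts of the basename
        set ps := splitDot s.toList with hps
        have hqfree : ∀ q ∈ ps, '.' ∉ q := splitDot_parts s.toList
        have hJps : J ps = s.toList := join_splitDot s.toList
        have hlen2 : 2 ≤ ps.length :=
          (dot_mem_join_iff ps (splitDot_ne_nil _) hqfree).mp (by rw [hJps]; exact hdot)
        -- ===== A side: loopA reduces to the closed form over ps =====
        have hdw : s.toList.dropWhile (· ≠ '.') = '.' :: (s.toList.dropWhile (· ≠ '.')).tail :=
          dropWhile_dot s.toList hdot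
        have hsplit : s.toList = s.toList.takeWhile (· ≠ '.') ++ '.' :: (s.toList.dropWhile (· ≠ '.')).tail := by
          rw [← hdw]
          exact (List.takeWhile_append_dropWhile (p := (· ≠ '.')) (l := s.toList)).symm
        have htwnd : '.' ∉ s.toList.takeWhile (· ≠ '.') := by
          intro hdot'
          have := List.mem_takeWhile_imp hdot'
          simp at this
        have hparts : ps = s.toList.takeWhile (· ≠ '.') :: splitDot ((s.toList.dropWhile (· ≠ '.')).tail) := by
          rw [hps]
          conv_lhs => rw [hsplit]
          rw [splitDot, dif_pos (by simp)]
          rw [tw_append _ _ htwnd, dw_append _ _ htwnd]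
          rfl
        set t := (s.toList.dropWhile (· ≠ '.')).tail with ht
        have hallJ : J (splitDot t) = t := join_splitDot t
        have hloop := loopA_join (splitDot t) (splitDot_ne_nil t) (splitDot_parts t)
          (s.toList.takeWhile (· ≠ '.'))
        rw [hallJ] at hloop
        have hA :
            loopA (s.toList.takeWhile (· ≠ '.')) t =
              if 3 ≤ ps.length ∧
                  PySem.Chars.lower (J (ps.drop (ps.length - 2))) ∈ multipartExtensions
              then (J (ps.take (ps.length - 2)), J (ps.drop (ps.length - 2)))
              else (J ps.dropLast, ps.getLastD []) := by
          rw [hloop, b_shape _ _ (splitDot_ne_nil t), ← hparts]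
        -- ===== B side: rsplitDot reduces to the same closed form =====
        have hrs : rsplitDot s.toList = (J ps.dropLast, ps.getLastD []) := by
          rw [← hJps]; exact rsplit_join ps hlen2 hqfree
        have hdlfree : ∀ q ∈ ps.dropLast, '.' ∉ q :=
          fun q hq' => hqfree q (List.dropLast_subset _ hq')
        have hdlne : ps.dropLast ≠ [] := by
          intro hcon
          have := congrArg List.length hcon
          simp [List.length_dropLast] at this
          omega
        have hstemdot : '.' ∈ J ps.dropLast ↔ 3 ≤ ps.length := by
          rw [dot_mem_join_iff _ hdlne hdlfree, List.length_dropLast]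
          omega
        by_cases h3 : 3 ≤ ps.length
        · -- decompose ps = ks ++ [x, y] with ks ≠ []
          obtain ⟨ks, x, y, hk⟩ := two_tail ps hlen2
          have hkslen : 1 ≤ ks.length := by
            have := congrArg List.length hk
            simp at this
            omega
          have hdl : ps.dropLast = ks ++ [x] := by
            rw [hk]
            rw [show ks ++ [x, y] = (ks ++ [x]) ++ [y] by simp]
            simp
          have hlast : ps.getLastD [] = y := by rw [hk]; simp
          have hdrop : ps.drop (ps.length - 2) = [x, y] := by
            rw [hk]
            have : (ks ++ [x, y]).length - 2 = ks.length := by simp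
            rw [this, List.drop_left]
          have htake : ps.take (ps.length - 2) = ks := by
            rw [hk]
            have : (ks ++ [x, y]).length - 2 = ks.length := by simp
            rw [this, List.take_left]
          -- the second rsplit, on the stem J (ks ++ [x])
          have hxfree : ∀ q ∈ ks ++ [x], '.' ∉ q := by rw [← hdl]; exact hdlfree
          have hrs2 : rsplitDot (J (ks ++ [x])) = (J ks, x) := by
            rw [rsplit_join (ks ++ [x]) (by simp; omega) hxfree]
            have h1 : (ks ++ [x]).dropLast = ks := by simp
            have h2 : (ks ++ [x]).getLastD [] = x := by simp
            rw [h1, h2]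
          have htail : (rsplitDot (J ps.dropLast)).2 ++ '.' :: ps.getLastD []
              = J (ps.drop (ps.length - 2)) := by
            rw [hdl, hrs2, hlast, hdrop]
            simp [J, PySem.Chars.join_cons_cons, PySem.Chars.join_singleton]
          rw [hA, hrs]
          by_cases hmp : PySem.Chars.lower (J (ps.drop (ps.length - 2))) ∈ multipartExtensions
          · rw [if_pos ⟨h3, hmp⟩]
            rw [if_pos ⟨hstemdot.mpr h3, by rw [htail]; exact hmp⟩]
            rw [htail, hdl, hrs2, htake]
          · rw [if_neg (by rintro ⟨-, hmm⟩; exact hmp hmm)]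
            rw [if_neg (by rintro ⟨-, hmm⟩; rw [htail] at hmm; exact hmp hmm)]
        · -- only two parts: no second dot, both take the last-dot split
          rw [hA, hrs]
          rw [if_neg (by rintro ⟨hmm, -⟩; exact h3 hmm)]
          rw [if_neg (by rintro ⟨hmm, -⟩; exact h3 (hstemdot.mp hmm))]
      · rw [if_neg hdot, if_neg hdot]
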